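-- pv_equiv track=rewrite | github.com/kpritche/church-automation | service/slide_utils.py | slice_into_slides
-- ===== SOURCE A (Python) =====
-- from typing import List, Dict
--
-- def _split_long_word(word: str, max_chars: int) -> List[str]:
--     """
--     Break a single word into multiple chunks of at most max_chars.
--     """
--     return [word[i:i+max_chars] for i in range(0, len(word), max_chars)]
--
-- def slice_into_slides(
--     text_chunks: List[str],
--     max_chars: int = 33,
--     max_lines: int = 2
-- ) -> List[Dict[str, str]]:
--     """
--     Convert a list of paragraphs (text_chunks) into a list of slides,
--     each obeying the constraints:
--       - <= max_lines lines per slide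
--       - <= max_chars characters per line
--
--     Returns:
--         List of dicts with keys:
--           - 'text': slide text (lines joined by '\n')
--           - 'style': 'content'
--     """
--     slides: List[Dict[str, str]] = []
--
--     for chunk in text_chunks:
--         # Split into words and handle any overly long words
--         words = chunk.strip().split()
--         tokens: List[str] = []
--         for w in words:
--             if len(w) > max_chars:
--                 tokens.extend(_split_long_word(w, max_chars))
--             else:
--                 tokens.append(w)
--
--         # Build lines by greedily filling up to max_chars
--         lines: List[str] = []
--         current_line = ""
--         for token in tokens:
--             if not current_line:
--                 current_line = token
--             elif len(current_line) + 1 + len(token) <= max_chars: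
--                 current_line += " " + token
--             else:
--                 lines.append(current_line)
--                 current_line = token
--         # append any remaining text
--         if current_line:
--             lines.append(current_line)
--
--         # Group lines into slides of up to max_lines
--         for i in range(0, len(lines), max_lines):
--             slide_lines = lines[i:i + max_lines]
--             slide_text = "\n ".join(slide_lines)
--             slides.append({"text": slide_text, "style": "content"})
--
--     return slides
-- ===== SOURCE B (Python) =====
-- def _take(token, cur, buf, max_chars, max_lines, slides):
--     """Feed one token into the current line; emit a slide the moment it fills."""
--     if not cur:
--         return token, buf
--     if len(cur) + 1 + len(token) <= max_chars:
--         return cur + " " + token, buf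
--     buf = buf + [cur]
--     if len(buf) == max_lines:
--         slides.append({"text": "\n ".join(buf), "style": "content"})
--         buf = []
--     return token, buf
--
-- def slice_into_slides(text_chunks, max_chars=33, max_lines=2):
--     """Single streaming pass per chunk: long words are cut into pieces on the fly,
--     lines are filled greedily, and a slide is emitted as soon as max_lines lines exist."""
--     if max_lines <= 0:
--         return []   # no slide can hold a non-positive number of lines
--     slides = []
--     for chunk in text_chunks:
--         buf = []   # lines of the slide currently being built
--         cur = ""   # the line currently being filled
--         for word in chunk.strip().split():
--             pieces = [word] if len(word) <= max_chars else \
--                 [word[i:i + max_chars] for i in range(0, len(word), max_chars)]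
--             for piece in pieces:
--                 cur, buf = _take(piece, cur, buf, max_chars, max_lines, slides)
--         if cur:
--             buf = buf + [cur]
--         if buf:
--             slides.append({"text": "\n ".join(buf), "style": "content"})
--     return slides
-- ===== Notes on version B (the rewrite author's own statement) =====
-- stated objective: alternative
-- what changed: Replaces A's three sequential per-chunk passes (token list, then line list, then a grouping pass over index ranges) by one streaming pass that feeds word pieces straight into the current line and emits a slide immediately whenever max_lines lines are buffered.
-- outside the precondition, e.g. on slice_into_slides([' '], 0, 2): A returns [], B returns []
import Mathlib
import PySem

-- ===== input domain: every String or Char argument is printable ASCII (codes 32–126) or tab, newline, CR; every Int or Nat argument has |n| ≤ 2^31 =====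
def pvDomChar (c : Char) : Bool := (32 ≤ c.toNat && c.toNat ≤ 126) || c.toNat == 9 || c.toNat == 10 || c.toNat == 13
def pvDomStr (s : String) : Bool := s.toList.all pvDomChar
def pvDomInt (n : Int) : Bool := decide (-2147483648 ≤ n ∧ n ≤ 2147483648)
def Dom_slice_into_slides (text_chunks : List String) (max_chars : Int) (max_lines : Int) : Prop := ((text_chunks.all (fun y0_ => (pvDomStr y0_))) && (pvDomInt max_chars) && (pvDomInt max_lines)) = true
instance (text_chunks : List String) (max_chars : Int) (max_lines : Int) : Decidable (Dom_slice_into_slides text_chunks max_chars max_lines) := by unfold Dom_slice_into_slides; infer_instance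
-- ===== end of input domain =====

-- B replaces A's three sequential per-chunk passes by one streaming pass that cuts long
-- words inline, fills lines greedily and emits each slide as soon as max_lines lines exist
-- (objective: alternative decomposition, same asymptotic cost).

-- ===== PORT A =====
def split_long_word (word : String) (max_chars : Int) : List String :=
  (PySem.List.pyRange 0 (PySem.Str.len word) max_chars).map
    (fun i => PySem.Str.slice word (some i) (some (i + max_chars)))

def slice_into_slides (text_chunks : List String) (max_chars : Int) (max_lines : Int) :
    List (List (String × String)) :=
  text_chunks.foldl (fun slides chunk =>
    let words := PySem.Str.split₀ (PySem.Str.strip chunk)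
    let tokens := words.foldl (fun toks w =>
      if PySem.Str.len w > max_chars then toks ++ split_long_word w max_chars
      else toks ++ [w]) []
    let lc := tokens.foldl (fun (p : List String × String) token =>
      if p.2 = "" then (p.1, token)
      else if PySem.Str.len p.2 + 1 + PySem.Str.len token ≤ max_chars then
        (p.1, p.2 ++ " " ++ token)
      else (p.1 ++ [p.2], token)) ([], "")
    let lines := if lc.2 = "" then lc.1 else lc.1 ++ [lc.2]
    (PySem.List.pyRange 0 (lines.length : Int) max_lines).foldl (fun acc i =>
      acc ++ [[("text", PySem.Str.join "\n " (PySem.List.slice lines (some i) (some (i + max_lines)))),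
               ("style", "content")]]) slides) []

-- ===== PORT B =====
def takeTok (max_chars max_lines : Int)
    (st : List (List (String × String)) × List String × String) (token : String) :
    List (List (String × String)) × List String × String :=
  if st.2.2 = "" then (st.1, st.2.1, token)
  else if PySem.Str.len st.2.2 + 1 + PySem.Str.len token ≤ max_chars then
    (st.1, st.2.1, st.2.2 ++ " " ++ token)
  else
    let buf := st.2.1 ++ [st.2.2]
    if (buf.length : Int) = max_lines then
      (st.1 ++ [[("text", PySem.Str.join "\n " buf), ("style", "content")]], [], token)
    else (st.1, buf, token)

def slice_into_slides_alt (text_chunks : List String) (max_chars : Int) (max_lines : Int) :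
    List (List (String × String)) :=
  if max_lines ≤ 0 then []
  else text_chunks.foldl (fun slides chunk =>
    let st := (PySem.Str.split₀ (PySem.Str.strip chunk)).foldl
      (fun st w =>
        (if PySem.Str.len w ≤ max_chars then [w]
         else (PySem.List.pyRange 0 (PySem.Str.len w) max_chars).map
           (fun i => PySem.Str.slice w (some i) (some (i + max_chars)))).foldl
          (takeTok max_chars max_lines) st) (slides, [], "")
    let buf := if st.2.2 = "" then st.2.1 else st.2.1 ++ [st.2.2]
    if buf = [] then st.1
    else st.1 ++ [[("text", PySem.Str.join "\n " buf), ("style", "content")]]) []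

-- ===== PRECONDITION & SPEC =====
-- Pre_ excludes max_chars = 0, where A raises ValueError (range step 0) on any chunk that
-- contains a word (on whitespace-only input both still return []), and max_lines = 0 with a
-- nonempty chunk list, where A always raises ValueError.
def Pre_slice_into_slides (text_chunks : List String) (max_chars : Int) (max_lines : Int) : Prop :=
  max_chars ≠ 0 ∧ (max_lines ≠ 0 ∨ text_chunks = [])
instance (text_chunks : List String) (max_chars : Int) (max_lines : Int) : Decidable (Pre_slice_into_slides text_chunks max_chars max_lines) := by unfold Pre_slice_into_slides; infer_instance
def pvWitness_slice_into_slides : List String × Int × Int := (["hello world example text"], 7, 2)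

def Spec_slice_into_slides (text_chunks : List String) (max_chars : Int) (max_lines : Int) (out : List (List (String × String))) : Prop := out = slice_into_slides_alt text_chunks max_chars max_lines
instance (text_chunks : List String) (max_chars : Int) (max_lines : Int) (out : List (List (String × String))) : Decidable (Spec_slice_into_slides text_chunks max_chars max_lines out) := by unfold Spec_slice_into_slides; infer_instance

-- ===== CLAIM (what is proved, stated in full; the proofs are below) =====
def Claim_equal_slice_into_slides : Prop := ∀ (text_chunks : List String) (max_chars : Int) (max_lines : Int), Dom_slice_into_slides text_chunks max_chars max_lines → Pre_slice_into_slides text_chunks max_chars max_lines → Spec_slice_into_slides text_chunks max_chars max_lines (slice_into_slides text_chunks max_chars max_lines)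

-- ===== LEMMAS AND PROOFS =====

theorem pvRange_pos_nil (a b s : Int) (hs : 0 < s) (hab : b ≤ a) :
    PySem.List.pyRange a b s = [] := by
  rw [PySem.List.pyRange_of_pos a b hs]; simp [show ¬ a < b by omega]

theorem pvRange_pos_cons (a b s : Int) (hs : 0 < s) (hab : a < b) :
    PySem.List.pyRange a b s = a :: PySem.List.pyRange (a + s) b s := by
  rw [PySem.List.pyRange_of_pos a b hs, PySem.List.pyRange_of_pos (a+s) b hs]
  have hq : (b - a + s - 1) / s = (b - a - 1) / s + 1 := by
    have := Int.add_mul_ediv_right (b - a - 1) 1 (by omega : s ≠ 0)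
    rw [show b - a + s - 1 = b - a - 1 + 1 * s by ring, this]
  have hq0 : 0 ≤ (b - a - 1) / s := Int.ediv_nonneg (by omega) (by omega)
  by_cases h2 : a + s < b
  · have hn : ((b - a + s - 1) / s).toNat = ((b - (a+s) + s - 1) / s).toNat + 1 := by
      rw [hq, show b - (a+s) + s - 1 = b - a - 1 by ring]; omega
    simp only [if_pos hab, if_pos h2, hn, List.range_succ_eq_map, List.map_cons, List.map_map]
    refine congrArg₂ _ (by simp) (List.map_congr_left fun k _ => ?_)
    simp [Function.comp]; ring
  · have hz : (b - a - 1) / s = 0 := Int.ediv_eq_zero_of_lt (by omega) (by omega)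
    have hn : ((b - a + s - 1) / s).toNat = 1 := by rw [hq, hz]; rfl
    simp [if_pos hab, if_neg h2, hn]

theorem pvRange_pos_shift (a b s : Int) (hs : 0 < s) :
    PySem.List.pyRange (a + s) b s = (PySem.List.pyRange a (b - s) s).map (· + s) := by
  rw [PySem.List.pyRange_of_pos _ b hs, PySem.List.pyRange_of_pos a _ hs, List.map_map]
  rw [show b - (a + s) + s - 1 = b - s - a + s - 1 by ring,
     if_congr (show (a + s < b) ↔ (a < b - s) by omega) rfl rfl]
  exact List.map_congr_left fun k _ => by simp [Function.comp]; ring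

def pvChunks {α : Type} (k : Nat) : List α → List (List α)
  | [] => []
  | x :: xs => (x :: xs.take (k - 1)) :: pvChunks k (xs.drop (k - 1))
termination_by l => l.length
decreasing_by simp

theorem pvChunks_cons {α : Type} (k : Nat) (xs : List α) (hk : 1 ≤ k) (hxs : xs ≠ []) :
    pvChunks k xs = xs.take k :: pvChunks k (xs.drop k) := by
  cases xs with
  | nil => simp at hxs
  | cons x t =>
    rw [pvChunks]
    have h1 : (x :: t).take k = x :: t.take (k-1) := by
      cases k with | zero => omega | succ n => simp
    have h2 : (x :: t).drop k = t.drop (k-1) := by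
      cases k with | zero => omega | succ n => simp
    rw [h1, h2]

theorem pvChunks_flatten {α : Type} (k : Nat) (full : List (List α)) (r : List α)
    (hk : 0 < k) (hfull : ∀ c ∈ full, c.length = k) (hr : r.length ≤ k) :
    pvChunks k (full.flatten ++ r) = full ++ (if r = [] then [] else [r]) := by
  induction full with
  | nil =>
    simp only [List.flatten_nil, List.nil_append]
    cases r with
    | nil => rw [pvChunks]; simp
    | cons x t =>
      rw [pvChunks]
      simp only [List.length_cons] at hr
      have ht : t.length ≤ k - 1 := by simp at hr; omega
      rw [List.take_of_length_le ht, List.drop_of_length_le ht, pvChunks]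
      simp
  | cons c cf ih =>
    have hc : c.length = k := hfull c (by simp)
    have hcf : ∀ x ∈ cf, x.length = k := fun x hx => hfull x (by simp [hx])
    have hne : c ++ (cf.flatten ++ r) ≠ [] := by
      cases c with | nil => simp at hc; omega | cons y ys => simp
    rw [List.flatten_cons, List.append_assoc,
        pvChunks_cons k _ hk hne,
        List.take_left' hc, List.drop_left' hc, ih hcf]
    simp

theorem pvCore {α : Type} (mc : Int) (hmc : 1 ≤ mc) (xs : List α) :
    (PySem.List.pyRange 0 (xs.length : Int) mc).map
        (fun i => PySem.List.slice xs (some i) (some (i + mc))) =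
      pvChunks mc.toNat xs := by
  generalize h : xs.length = n
  induction n using Nat.strong_induction_on generalizing xs with
  | _ n ih =>
    cases xs with
    | nil =>
      have h0 : n = 0 := by simpa using h.symm
      subst h0
      rw [pvChunks, show ((0:Nat) : Int) = 0 by simp, pvRange_pos_nil 0 0 mc (by omega) (by omega)]
      rfl
    | cons x t =>
      have hn1 : 1 ≤ n := by simp at h; omega
      rw [pvRange_pos_cons 0 n mc (by omega) (by exact_mod_cast hn1), List.map_cons]
      have hhead : PySem.List.slice (x :: t) (some 0) (some (0 + mc)) = (x :: t).take mc.toNat := by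
        rw [PySem.List.slice_toNat _ (by omega) (by omega)]; simp
      by_cases hbig : (n : Int) ≤ mc
      · have : PySem.List.pyRange (0 + mc) n mc = [] := pvRange_pos_nil _ _ _ (by omega) (by omega)
        rw [this, pvChunks_cons mc.toNat (x :: t) (by omega) (by simp)]
        have hd : (x :: t).drop mc.toNat = [] := List.drop_of_length_le (by simp at h ⊢; omega)
        rw [hd, hhead, pvChunks]
        simp
      · rw [not_le] at hbig
        have hsh := pvRange_pos_shift 0 n mc (by omega)
        rw [hsh, List.map_map]
        have hdl : ((x :: t).drop mc.toNat).length = n - mc.toNat := by simp at h ⊢; omega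
        have ihd := ih (n - mc.toNat) (by omega) ((x :: t).drop mc.toNat) hdl
        rw [show ((n - mc.toNat : Nat) : Int) = (n : Int) - mc by omega] at ihd
        rw [pvChunks_cons mc.toNat (x :: t) (by omega) (by simp), hhead]
        refine congrArg₂ _ rfl ?_
        rw [← ihd]
        refine List.map_congr_left fun i hi => ?_
        have hi0 : 0 ≤ i := by
          rcases (PySem.List.mem_pyRange_iff_of_pos (by omega : (0:Int) < mc) i).1 hi with ⟨h1, _, _⟩
          exact h1
        simp only [Function.comp_apply]
        rw [PySem.List.slice_toNat _ (by omega) (by omega),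
            PySem.List.slice_toNat _ (by omega) (by omega), List.drop_drop]
        rw [show (i + mc).toNat = mc.toNat + i.toNat by omega]
        congr 1
        omega

-- the slide record built from a buffered group of lines
def pvMkSlide (l : List String) : List (String × String) :=
  [("text", PySem.Str.join "\n " l), ("style", "content")]

def pvStepA (mc : Int) (p : List String × String) (token : String) : List String × String :=
  if p.2 = "" then (p.1, token)
  else if PySem.Str.len p.2 + 1 + PySem.Str.len token ≤ mc then
    (p.1, p.2 ++ " " ++ token)
  else (p.1 ++ [p.2], token)

theorem pvInv (mc ml : Int) (hml : 1 ≤ ml) :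
    ∀ (toks : List String) (S : List (List (String × String)))
      (full : List (List String)) (buf : List String) (cur : String),
      (∀ c ∈ full, c.length = ml.toNat) → buf.length < ml.toNat →
      ∃ (full' : List (List String)) (buf' : List String) (cur' : String),
        (∀ c ∈ full', c.length = ml.toNat) ∧ buf'.length < ml.toNat ∧
        toks.foldl (pvStepA mc) (full.flatten ++ buf, cur) = (full'.flatten ++ buf', cur') ∧
        toks.foldl (takeTok mc ml) (S ++ full.map pvMkSlide, buf, cur)
          = (S ++ full'.map pvMkSlide, buf', cur') := by
  intro toks
  induction toks with
  | nil =>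
    intro S full buf cur hfull hbuf
    exact ⟨full, buf, cur, hfull, hbuf, rfl, rfl⟩
  | cons tok rest ih =>
    intro S full buf cur hfull hbuf
    rw [List.foldl_cons, List.foldl_cons]
    by_cases hcur : cur = ""
    · rw [show pvStepA mc (full.flatten ++ buf, cur) tok = (full.flatten ++ buf, tok) by
        unfold pvStepA; simp [hcur, -PySem.Str.len_eq]]
      rw [show takeTok mc ml (S ++ full.map pvMkSlide, buf, cur) tok
          = (S ++ full.map pvMkSlide, buf, tok) by
        unfold takeTok; simp [hcur, -PySem.Str.len_eq]]
      exact ih S full buf tok hfull hbuf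
    · by_cases hfit : PySem.Str.len cur + 1 + PySem.Str.len tok ≤ mc
      · rw [show pvStepA mc (full.flatten ++ buf, cur) tok
            = (full.flatten ++ buf, cur ++ " " ++ tok) by
          unfold pvStepA; simp [hcur, hfit, -PySem.Str.len_eq]]
        rw [show takeTok mc ml (S ++ full.map pvMkSlide, buf, cur) tok
            = (S ++ full.map pvMkSlide, buf, cur ++ " " ++ tok) by
          unfold takeTok; simp [hcur, hfit, -PySem.Str.len_eq]]
        exact ih S full buf (cur ++ " " ++ tok) hfull hbuf
      · rw [show pvStepA mc (full.flatten ++ buf, cur) tok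
            = (full.flatten ++ (buf ++ [cur]), tok) by
          unfold pvStepA; simp [hcur, hfit, -PySem.Str.len_eq]]
        by_cases hfullbuf : ((buf.length : Int) + 1) = ml
        · rw [show takeTok mc ml (S ++ full.map pvMkSlide, buf, cur) tok
              = (S ++ (full ++ [buf ++ [cur]]).map pvMkSlide, [], tok) by
            unfold takeTok; simp [hcur, hfit, hfullbuf, pvMkSlide, -PySem.Str.len_eq]]
          have hlenb : (buf ++ [cur]).length = ml.toNat := by
            simp only [List.length_append, List.length_cons, List.length_nil]
            omega
          have hfull2 : ∀ c ∈ full ++ [buf ++ [cur]], c.length = ml.toNat := by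
            intro c hc
            rcases List.mem_append.mp hc with h | h
            · exact hfull c h
            · simp at h; rw [h]; exact hlenb
          have := ih S (full ++ [buf ++ [cur]]) [] tok hfull2 (by simp; omega)
          simpa [List.flatten_append, List.append_assoc] using this
        · rw [show takeTok mc ml (S ++ full.map pvMkSlide, buf, cur) tok
              = (S ++ full.map pvMkSlide, buf ++ [cur], tok) by
            unfold takeTok; simp [hcur, hfit, hfullbuf, -PySem.Str.len_eq]]
          have hb2 : (buf ++ [cur]).length < ml.toNat := by
            simp only [List.length_append, List.length_cons, List.length_nil]
            omega
          exact ih S full (buf ++ [cur]) tok hfull hb2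

theorem pvFoldlSnoc {α β : Type} (g : α → β) (l : List α) (S : List β) :
    l.foldl (fun acc i => acc ++ [g i]) S = S ++ l.map g := by
  induction l generalizing S with
  | nil => simp
  | cons x t ih => simp [ih]

theorem pvFoldlFlatMap {α β γ : Type} (g : α → List β) (f : γ → β → γ) (l : List α) (init : γ) :
    (l.flatMap g).foldl f init = l.foldl (fun acc x => (g x).foldl f acc) init := by
  induction l generalizing init with
  | nil => simp
  | cons x t ih => simp [List.foldl_append, ih]

set_option maxHeartbeats 1000000 in
theorem pvBodyEq (mc ml : Int) (hml : 1 ≤ ml)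
    (S : List (List (String × String))) (chunk : String) :
    (let st := (PySem.Str.split₀ (PySem.Str.strip chunk)).foldl
        (fun st w =>
          (if PySem.Str.len w ≤ mc then [w]
           else (PySem.List.pyRange 0 (PySem.Str.len w) mc).map
             (fun i => PySem.Str.slice w (some i) (some (i + mc)))).foldl
            (takeTok mc ml) st) (S, [], "")
     let buf := if st.2.2 = "" then st.2.1 else st.2.1 ++ [st.2.2]
     if buf = [] then st.1
     else st.1 ++ [[("text", PySem.Str.join "\n " buf), ("style", "content")]]) =
    (let words := PySem.Str.split₀ (PySem.Str.strip chunk)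
     let tokens := words.foldl (fun toks w =>
       if PySem.Str.len w > mc then toks ++ split_long_word w mc else toks ++ [w]) []
     let lc := tokens.foldl (fun (p : List String × String) token =>
       if p.2 = "" then (p.1, token)
       else if PySem.Str.len p.2 + 1 + PySem.Str.len token ≤ mc then
         (p.1, p.2 ++ " " ++ token)
       else (p.1 ++ [p.2], token)) ([], "")
     let lines := if lc.2 = "" then lc.1 else lc.1 ++ [lc.2]
     (PySem.List.pyRange 0 (lines.length : Int) ml).foldl (fun acc i =>
       acc ++ [[("text", PySem.Str.join "\n " (PySem.List.slice lines (some i) (some (i + ml)))),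
                ("style", "content")]]) S) := by
  rw [show (fun (p : List String × String) (token : String) =>
       if p.2 = "" then (p.1, token)
       else if PySem.Str.len p.2 + 1 + PySem.Str.len token ≤ mc then
         (p.1, p.2 ++ " " ++ token)
       else (p.1 ++ [p.2], token)) = pvStepA mc from rfl]
  have hfun : (fun (st : List (List (String × String)) × List String × String) (w : String) =>
        (if PySem.Str.len w ≤ mc then [w]
         else (PySem.List.pyRange 0 (PySem.Str.len w) mc).map
           (fun i => PySem.Str.slice w (some i) (some (i + mc)))).foldl
          (takeTok mc ml) st)
      = (fun st w => (if PySem.Str.len w > mc then split_long_word w mc else [w]).foldl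
          (takeTok mc ml) st) := by
    funext st w
    by_cases h : PySem.Str.len w ≤ mc
    · rw [if_pos h, if_neg (by omega)]
    · rw [if_neg h, if_pos (by omega)]; rfl
  have hstep : (fun (toks : List String) (w : String) =>
      if PySem.Str.len w > mc then toks ++ split_long_word w mc else toks ++ [w])
      = (fun toks w => toks ++ (if PySem.Str.len w > mc then split_long_word w mc else [w])) := by
    funext toks w; split <;> rfl
  have htok : List.foldl (fun toks w =>
        toks ++ (if PySem.Str.len w > mc then split_long_word w mc else [w])) []
        (PySem.Str.split₀ (PySem.Str.strip chunk))
      = (PySem.Str.split₀ (PySem.Str.strip chunk)).flatMap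
          (fun w => if PySem.Str.len w > mc then split_long_word w mc else [w]) := by
    rw [PySem.List.foldl_append_eq_flatMap]
    exact List.nil_append _
  obtain ⟨full', buf', cur', hf', hb', hA, hB⟩ :=
    pvInv mc ml hml ((PySem.Str.split₀ (PySem.Str.strip chunk)).flatMap
      (fun w => if PySem.Str.len w > mc then split_long_word w mc else [w])) S [] [] ""
      (by intro c hc; simp at hc) (by simp; omega)
  simp only [List.flatten_nil, List.map_nil, List.append_nil] at hA hB
  have hgroup : ∀ lines : List String,
      (PySem.List.pyRange 0 ((lines.length : Nat) : Int) ml).foldl (fun acc i =>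
        acc ++ [[("text", PySem.Str.join "\n " (PySem.List.slice lines (some i) (some (i + ml)))),
                 ("style", "content")]]) S
      = S ++ (pvChunks ml.toNat lines).map pvMkSlide := by
    intro lines
    rw [pvFoldlSnoc]
    rw [show (fun i => [("text", PySem.Str.join "\n " (PySem.List.slice lines (some i) (some (i + ml)))),
          ("style", "content")])
        = pvMkSlide ∘ (fun i => PySem.List.slice lines (some i) (some (i + ml))) from rfl]
    rw [← List.map_map, pvCore ml hml lines]
  simp only [hfun, hstep, htok, ← pvFoldlFlatMap, hA, hB, hgroup]
  by_cases hc0 : cur' = ""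
  · simp only [if_pos hc0]
    rw [pvChunks_flatten ml.toNat full' buf' (by omega) hf' (by omega)]
    by_cases hb0 : buf' = []
    · simp [hb0]
    · simp [hb0, pvMkSlide]
  · simp only [if_neg hc0]
    rw [show full'.flatten ++ buf' ++ [cur'] = full'.flatten ++ (buf' ++ [cur']) from
          List.append_assoc _ _ _,
        pvChunks_flatten ml.toNat full' (buf' ++ [cur']) (by omega) hf' (by simp; omega)]
    simp [pvMkSlide]

theorem pvRange_nonpos_nil (b s : Int) (hs : s < 0) (hb : 0 ≤ b) :
    PySem.List.pyRange 0 b s = [] := by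
  simp [PySem.List.pyRange, show s ≠ 0 by omega, show ¬ 0 < s by omega, show ¬ b < 0 by omega]

theorem pvFoldlConst {α β : Type} (f : β → α → β) (l : List α) (h : ∀ S x, f S x = S) :
    ∀ S, l.foldl f S = S := by
  induction l with
  | nil => intro S; rfl
  | cons c t ih => intro S; rw [List.foldl_cons, h S c]; exact ih S

theorem pvGroupNeg {β : Type} (g : β → Int → β) (n : Nat) (s : Int) (hs : s < 0) (S : β) :
    List.foldl g S (PySem.List.pyRange 0 (n : Int) s) = S := by
  rw [pvRange_nonpos_nil _ s hs (by positivity)]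
  rfl

-- with a negative max_lines, A's grouping range is empty: no chunk contributes a slide
theorem pvMainNeg (tcs : List String) (mc ml : Int) (hml : ml < 0) :
    slice_into_slides tcs mc ml = [] := by
  unfold slice_into_slides
  refine pvFoldlConst _ tcs (fun S c => ?_) []
  have hg := fun {β : Type} (g : β → Int → β) (n : Nat) (S : β) => pvGroupNeg g n ml hml S
  simp only [hg]

set_option maxHeartbeats 1000000 in
theorem pvMain (tcs : List String) (mc ml : Int) (hml : 1 ≤ ml) :
    slice_into_slides tcs mc ml = slice_into_slides_alt tcs mc ml := by
  unfold slice_into_slides slice_into_slides_alt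
  rw [if_neg (by omega : ¬ ml ≤ 0)]
  rw [show (fun (slides : List (List (String × String))) (chunk : String) =>
        let words := PySem.Str.split₀ (PySem.Str.strip chunk)
        let tokens := words.foldl (fun toks w =>
          if PySem.Str.len w > mc then toks ++ split_long_word w mc
          else toks ++ [w]) []
        let lc := tokens.foldl (fun (p : List String × String) token =>
          if p.2 = "" then (p.1, token)
          else if PySem.Str.len p.2 + 1 + PySem.Str.len token ≤ mc then
            (p.1, p.2 ++ " " ++ token)
          else (p.1 ++ [p.2], token)) ([], "")
        let lines := if lc.2 = "" then lc.1 else lc.1 ++ [lc.2]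
        (PySem.List.pyRange 0 (lines.length : Int) ml).foldl (fun acc i =>
          acc ++ [[("text", PySem.Str.join "\n " (PySem.List.slice lines (some i) (some (i + ml)))),
                   ("style", "content")]]) slides)
      = (fun slides chunk =>
        let st := (PySem.Str.split₀ (PySem.Str.strip chunk)).foldl
          (fun st w =>
            (if PySem.Str.len w ≤ mc then [w]
             else (PySem.List.pyRange 0 (PySem.Str.len w) mc).map
               (fun i => PySem.Str.slice w (some i) (some (i + mc)))).foldl
              (takeTok mc ml) st) (slides, [], "")
        let buf := if st.2.2 = "" then st.2.1 else st.2.1 ++ [st.2.2]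
        if buf = [] then st.1
        else st.1 ++ [[("text", PySem.Str.join "\n " buf), ("style", "content")]])
      from funext fun S => funext fun c => (pvBodyEq mc ml hml S c).symm]

-- ===== VERDICT (by name: the statement is the Claim_ definition above) =====
theorem slice_into_slides_spec : Claim_equal_slice_into_slides := by
  intro text_chunks max_chars max_lines _hdom hpre
  unfold Spec_slice_into_slides
  by_cases hml : 1 ≤ max_lines
  · exact pvMain text_chunks max_chars max_lines hml
  · unfold Pre_slice_into_slides at hpre
    refine (hpre.2).elim (fun h0 => ?_) (fun hnil => ?_)
    · rw [pvMainNeg text_chunks max_chars max_lines (by omega)]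
      unfold slice_into_slides_alt
      rw [if_pos (by omega)]
    · subst hnil
      unfold slice_into_slides slice_into_slides_alt
      rw [if_pos (by omega : max_lines ≤ 0)]
      rfl
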